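-- pv_equiv track=rewrite | github.com/TarhunchiKKK/vlados | lab2/bitstaffing.py | split_recieved_data_on_cadres
-- ===== SOURCE A (Python) =====
-- flag: str = '00010010'          # исходный флаг
--
-- def split_recieved_data_on_cadres(data: str) -> list[str]:
--     cadres: list[str] = []
--     old_index: int = 0
--     while True:
--         flag_position: int = data.find(flag, old_index)
--         if flag_position == -1:
--             break
--         old_index = flag_position
--         new_index: int = data.find(flag, old_index + 16)
--         if new_index == -1:
--             cadres.append(data[old_index::1])
--             break
--
--         # этот if возможно вообще не нужен
--         if new_index >= len(data):
--             break
--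
--         cadres.append(data[old_index:new_index:1])
--
--         old_index = new_index
--     return cadres
-- ===== SOURCE B (Python) =====
-- flag: str = '00010010'          # исходный флаг
--
-- def _frames(data: str, cur: int, rest: list[int]) -> list[str]:
--     nxt = [p for p in rest if p >= cur + 16]
--     if not nxt:
--         return [data[cur:]]
--     return [data[cur:nxt[0]]] + _frames(data, nxt[0], nxt[1:])
--
-- def split_recieved_data_on_cadres(data: str) -> list[str]:
--     positions = [i for i in range(len(data)) if data[i:i + 8] == flag]
--     if not positions:
--         return []
--     return _frames(data, positions[0], positions[1:])
-- ===== Notes on version B (the rewrite author's own statement) =====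
-- stated objective: alternative
-- what changed: A's single find-driven while-loop is replaced by a two-phase decomposition: first build the index table of all flag occurrences, then greedily select occurrences at least 16 apart and cut the frames between consecutive selected positions.
import Mathlib
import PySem

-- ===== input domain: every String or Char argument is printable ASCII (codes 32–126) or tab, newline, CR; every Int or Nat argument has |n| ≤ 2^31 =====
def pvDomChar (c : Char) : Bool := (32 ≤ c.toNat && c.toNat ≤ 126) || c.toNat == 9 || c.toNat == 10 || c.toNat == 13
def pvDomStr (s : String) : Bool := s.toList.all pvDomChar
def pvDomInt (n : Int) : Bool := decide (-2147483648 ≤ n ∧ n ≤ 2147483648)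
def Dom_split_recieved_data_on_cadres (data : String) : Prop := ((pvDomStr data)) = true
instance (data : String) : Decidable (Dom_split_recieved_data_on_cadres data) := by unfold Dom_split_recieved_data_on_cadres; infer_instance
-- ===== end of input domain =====

-- B replaces A's find-driven while-loop by a two-phase decomposition: first build the table of all
-- flag positions, then greedily select positions ≥ previous+16 and cut the frames (same cost class).

-- ===== PORT A =====
-- the module constant flag = '00010010' (ports work on the Chars level)
def pvFlag : List Char := ['0', '0', '0', '1', '0', '0', '1', '0']

-- A's 'while True' loop; the fuel argument only makes the recursion total (old_index strictly
-- increases each iteration, so data.length + 1 iterations always suffice); it is not a semantic change.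
def pvALoop (data : List Char) (cadres : List (List Char)) (old_index : Int) : Nat → List (List Char)
  | 0 => cadres
  | fuel + 1 =>
    let flag_position : Int := PySem.Chars.findFrom data pvFlag old_index
    if flag_position = -1 then cadres
    else
      let old_index := flag_position
      let new_index : Int := PySem.Chars.findFrom data pvFlag (old_index + 16)
      if new_index = -1 then cadres ++ [PySem.List.slice data (some old_index) none]
      else if (data.length : Int) ≤ new_index then cadres
      else pvALoop data (cadres ++ [PySem.List.slice data (some old_index) (some new_index)]) new_index fuel

def split_recieved_data_on_cadres (data : String) : List String :=
  (pvALoop data.toList [] 0 (data.toList.length + 1)).map String.ofList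

-- ===== PORT B =====
-- positions = [i for i in range(len(data)) if data[i:i+8] == flag]
def pvPositions (data : List Char) : List Int :=
  (PySem.List.pyRange 0 data.length 1).filter
    (fun i => decide (PySem.List.slice data (some i) (some (i + 8)) = pvFlag))

-- _frames(data, cur, rest)
def pvBFrames (data : List Char) (cur : Int) (rest : List Int) : List (List Char) :=
  match h : rest.filter (fun p => decide (cur + 16 ≤ p)) with
  | [] => [PySem.List.slice data (some cur) none]
  | q :: qs => PySem.List.slice data (some cur) (some q) :: pvBFrames data q qs
termination_by rest.length
decreasing_by
  have := List.length_filter_le (fun p => decide (cur + 16 ≤ p)) rest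
  rw [h] at this; simp at this; omega

def split_recieved_data_on_cadres_alt (data : String) : List String :=
  match pvPositions data.toList with
  | [] => []
  | p :: ps => (pvBFrames data.toList p ps).map String.ofList

-- ===== PRECONDITION & SPEC =====
def Spec_split_recieved_data_on_cadres (data : String) (out : List String) : Prop := out = split_recieved_data_on_cadres_alt data
instance (data : String) (out : List String) : Decidable (Spec_split_recieved_data_on_cadres data out) := by unfold Spec_split_recieved_data_on_cadres; infer_instance

-- ===== CLAIM (what is proved, stated in full; the proofs are below) =====
def Claim_equal_split_recieved_data_on_cadres : Prop := ∀ (data : String), Dom_split_recieved_data_on_cadres data → Spec_split_recieved_data_on_cadres data (split_recieved_data_on_cadres data)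

-- ===== LEMMAS AND PROOFS =====

-- a match at k fits inside data
theorem pv_match_bound {D : List Char} {k : Nat} (h : pvFlag <+: D.drop k) :
    k + 8 ≤ D.length := by
  have hl := h.length_le
  simp [pvFlag] at hl
  omega

-- B's filter predicate at a natural index says exactly 'the flag matches at k'
theorem pv_pred_eq {D : List Char} (k : Nat) :
    (PySem.List.slice D (some (k : Int)) (some ((k : Int) + 8)) = pvFlag) ↔ pvFlag <+: D.drop k := by
  have h8 : ((k : Int) + 8) = ((k + 8 : Nat) : Int) := by push_cast; ring
  rw [h8, PySem.List.slice_natCast]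
  have : k + 8 - k = 8 := by omega
  rw [this]
  rw [List.prefix_iff_eq_take]
  constructor
  · intro h; exact h.symm
  · intro h; simpa [pvFlag] using h.symm

-- membership in the position table
theorem pv_mem_positions {D : List Char} {k : Nat} :
    ((k : Int) ∈ pvPositions D) ↔ pvFlag <+: D.drop k := by
  unfold pvPositions
  rw [List.mem_filter, PySem.List.mem_pyRange_one]
  simp only [decide_eq_true_eq, pv_pred_eq]
  constructor
  · exact fun h => h.2
  · intro h
    have := pv_match_bound h
    exact ⟨⟨by omega, by omega⟩, h⟩

theorem pv_positions_shape {D : List Char} {x : Int} (hx : x ∈ pvPositions D) :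
    ∃ k : Nat, x = (k : Int) ∧ pvFlag <+: D.drop k := by
  unfold pvPositions at hx
  rw [List.mem_filter, PySem.List.mem_pyRange_one] at hx
  obtain ⟨⟨h0, _⟩, hp⟩ := hx
  refine ⟨x.toNat, by omega, ?_⟩
  have hx' : ((x.toNat : Nat) : Int) = x := by omega
  rw [← (pv_pred_eq (D := D) x.toNat), hx']
  simpa using hp

theorem pv_positions_sorted (D : List Char) : (pvPositions D).Pairwise (· < ·) :=
  (PySem.List.pairwise_lt_pyRange_one 0 D.length).filter _

-- findFrom past the end of the string finds nothing
theorem pv_findFrom_big {D : List Char} {m : Int} (hm : 0 ≤ m) (h : (D.length : Int) < m) :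
    PySem.Chars.findFrom D pvFlag m = -1 := by
  simp only [PySem.Chars.findFrom]
  have hst : (if m < 0 then if m + (D.length : Int) < 0 then 0 else m + (D.length : Int) else m) = m := by
    rw [if_neg (by omega)]
  rw [hst, if_pos (by omega)]

-- findFrom = -1 iff there is no match at or after m (any 0 ≤ m, even past the end)
theorem pv_findFrom_eq_neg_one {D : List Char} {m : Int} (hm : 0 ≤ m) :
    PySem.Chars.findFrom D pvFlag m = -1 ↔ ∀ k : Nat, m ≤ (k : Int) → ¬ pvFlag <+: D.drop k := by
  by_cases hle : m ≤ (D.length : Int)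
  · have hm' : m = ((m.toNat : Nat) : Int) := by omega
    rw [hm']
    rw [PySem.Chars.findFrom_natCast_eq_neg_one_iff D pvFlag m.toNat (by omega)]
    rw [← PySem.Chars.isIn_iff_infix, ← PySem.Chars.exists_prefix_drop_iff_isIn]
    constructor
    · intro h k hk hp
      exact h ⟨k - m.toNat, by rw [List.drop_drop]; have : m.toNat + (k - m.toNat) = k := by omega
                               rw [this]; exact hp⟩
    · rintro h ⟨j, hj⟩
      rw [List.drop_drop] at hj
      exact h (m.toNat + j) (by omega) hj
  · rw [pv_findFrom_big hm (by omega)]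
    constructor
    · intro _ k hk hp
      have := pv_match_bound hp
      omega
    · intro _; rfl

-- a non-(-1) findFrom is the least match at or after m
theorem pv_findFrom_spec {D : List Char} {m : Int} (hm : 0 ≤ m)
    (h : PySem.Chars.findFrom D pvFlag m ≠ -1) :
    m ≤ PySem.Chars.findFrom D pvFlag m ∧ 0 ≤ PySem.Chars.findFrom D pvFlag m ∧
      pvFlag <+: D.drop (PySem.Chars.findFrom D pvFlag m).toNat ∧
      ∀ k : Nat, m ≤ (k : Int) → (k : Int) < PySem.Chars.findFrom D pvFlag m →
        ¬ pvFlag <+: D.drop k := by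
  by_cases hle : m ≤ (D.length : Int)
  · have hm' : m = ((m.toNat : Nat) : Int) := by omega
    rw [hm'] at h ⊢
    obtain ⟨h1, h2, h3⟩ := PySem.Chars.findFrom_natCast_spec D pvFlag m.toNat (by omega) h
    refine ⟨h1, by omega, h2, ?_⟩
    intro k hk hk2
    exact h3 k (by omega) (by omega)
  · exact absurd (pv_findFrom_big hm (by omega)) h

-- searching from a match position finds that very position
theorem pv_findFrom_at_match {D : List Char} {k : Nat} (h : pvFlag <+: D.drop k) :
    PySem.Chars.findFrom D pvFlag (k : Int) = (k : Int) := by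
  have hne : PySem.Chars.findFrom D pvFlag (k : Int) ≠ -1 := by
    rw [Ne, pv_findFrom_eq_neg_one (Int.natCast_nonneg k)]
    push Not
    exact ⟨k, by omega, h⟩
  obtain ⟨h1, h2, h3, h4⟩ := pv_findFrom_spec (Int.natCast_nonneg k) hne
  by_contra hne2
  exact h4 k (by omega) (by omega) h

-- equation lemmas for pvBFrames
theorem pvBFrames_nil (data : List Char) (cur : Int) (rest : List Int)
    (h : rest.filter (fun p => decide (cur + 16 ≤ p)) = []) :
    pvBFrames data cur rest = [PySem.List.slice data (some cur) none] := by
  rw [pvBFrames]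
  split
  · rfl
  · next q qs heq => rw [h] at heq; cases heq

theorem pvBFrames_cons (data : List Char) (cur : Int) (rest : List Int) (q : Int) (qs : List Int)
    (h : rest.filter (fun p => decide (cur + 16 ≤ p)) = q :: qs) :
    pvBFrames data cur rest = PySem.List.slice data (some cur) (some q) :: pvBFrames data q qs := by
  rw [pvBFrames]
  split
  · next heq => rw [h] at heq; cases heq
  · next q' qs' heq =>
      rw [h] at heq
      cases heq
      rfl

-- a sorted list whose minimum is q starts with q
theorem pv_head_sorted {L : List Int} {q : Int} (hq : q ∈ L) (hmin : ∀ x ∈ L, q ≤ x)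
    (hp : L.Pairwise (· < ·)) : ∃ qs, L = q :: qs := by
  cases L with
  | nil => cases hq
  | cons a as =>
    rcases List.mem_cons.mp hq with rfl | hq
    · exact ⟨as, rfl⟩
    · have h1 := (List.pairwise_cons.mp hp).1 q hq
      have h2 := hmin a (by simp)
      omega

-- main loop correspondence: entering A's loop at a match position cur, with rest the table of all
-- match positions after cur, produces exactly B's frames
theorem pv_main (D : List Char) : ∀ (fuel : Nat) (rest : List Int) (cur : Nat)
    (cadres : List (List Char)),
    rest.length < fuel →
    pvFlag <+: D.drop cur →
    rest.Pairwise (· < ·) →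
    (∀ x : Int, x ∈ rest ↔ ((cur : Int) < x ∧ ∃ k : Nat, x = (k : Int) ∧ pvFlag <+: D.drop k)) →
    pvALoop D cadres (cur : Int) fuel = cadres ++ pvBFrames D (cur : Int) rest := by
  intro fuel
  induction fuel with
  | zero => intro rest cur cadres hf; omega
  | succ f ih =>
    intro rest cur cadres hf hcur hsort hchar
    have hfp := pv_findFrom_at_match hcur
    set nxt := rest.filter (fun p => decide ((cur : Int) + 16 ≤ p)) with hnxt
    have hnxtmem : ∀ x : Int, x ∈ nxt ↔ ((cur : Int) + 16 ≤ x ∧ ∃ k : Nat, x = (k : Int) ∧ pvFlag <+: D.drop k) := by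
      intro x
      rw [hnxt, List.mem_filter, hchar x]
      constructor
      · rintro ⟨⟨_, hk⟩, hge⟩; exact ⟨by simpa using hge, hk⟩
      · rintro ⟨hge, hk⟩; exact ⟨⟨by omega, hk⟩, by simpa using hge⟩
    have hnxtsort : nxt.Pairwise (· < ·) := hsort.filter _
    by_cases hni : PySem.Chars.findFrom D pvFlag ((cur : Int) + 16) = -1
    · -- no further flag: both emit the tail frame and stop
      have hempty : nxt = [] := by
        rcases hn : nxt with _ | ⟨x, xs⟩
        · rfl
        · exfalso
          have hx : x ∈ nxt := by rw [hn]; simp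
          obtain ⟨hge, k, rfl, hk⟩ := (hnxtmem x).mp hx
          exact (pv_findFrom_eq_neg_one (by omega)).mp hni k hge hk
      rw [pvBFrames_nil D ((cur : Int)) rest (hnxt ▸ hempty)]
      simp only [pvALoop, hfp, hni]
      simp
    · -- a next flag exists at r, the least match ≥ cur + 16
      obtain ⟨h1, h2, h3, h4⟩ := pv_findFrom_spec (by omega) hni
      set r := PySem.Chars.findFrom D pvFlag ((cur : Int) + 16) with hr
      have hrq : r = ((r.toNat : Nat) : Int) := by omega
      have hbound := pv_match_bound h3
      have hrmem : r ∈ nxt := by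
        rw [hnxtmem]; exact ⟨h1, r.toNat, by omega, h3⟩
      have hrmin : ∀ x ∈ nxt, r ≤ x := by
        intro x hx
        obtain ⟨hge, k, rfl, hk⟩ := (hnxtmem x).mp hx
        by_contra hlt
        exact h4 k hge (by omega) hk
      obtain ⟨qs, hqs⟩ := pv_head_sorted hrmem hrmin hnxtsort
      have hqslen : qs.length < f := by
        have h5 := List.length_filter_le (fun p => decide ((cur : Int) + 16 ≤ p)) rest
        rw [← hnxt, hqs] at h5
        simp at h5; omega
      have hqschar : ∀ x : Int, x ∈ qs ↔ (r < x ∧ ∃ k : Nat, x = (k : Int) ∧ pvFlag <+: D.drop k) := by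
        intro x
        constructor
        · intro hx
          have hxn : x ∈ nxt := by rw [hqs]; exact List.mem_cons_of_mem _ hx
          have hlt := (List.pairwise_cons.mp (hqs ▸ hnxtsort)).1 x hx
          exact ⟨hlt, ((hnxtmem x).mp hxn).2⟩
        · rintro ⟨hlt, k, rfl, hk⟩
          have hxn : (k : Int) ∈ nxt := (hnxtmem _).mpr ⟨by omega, k, rfl, hk⟩
          rw [hqs] at hxn
          rcases List.mem_cons.mp hxn with heq | hm
          · omega
          · exact hm
      have hqssort : qs.Pairwise (· < ·) := (List.pairwise_cons.mp (hqs ▸ hnxtsort)).2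
      have hA : pvALoop D cadres (cur : Int) (f + 1) =
          pvALoop D (cadres ++ [PySem.List.slice D (some (cur : Int)) (some r)]) r f := by
        simp only [pvALoop, hfp, ← hr]
        rw [if_neg (by omega), if_neg hni, if_neg (by omega)]
      have hB : pvBFrames D (cur : Int) rest =
          PySem.List.slice D (some (cur : Int)) (some r) :: pvBFrames D r qs :=
        pvBFrames_cons D ((cur : Int)) rest r qs (by rw [← hnxt]; exact hqs)
      rw [hA, hB]
      rw [hrq] at h3 ⊢
      rw [ih qs r.toNat _ hqslen h3 hqssort (by rw [← hrq]; exact hqschar)]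
      simp

theorem pv_length_positions (D : List Char) : (pvPositions D).length ≤ D.length := by
  have h := List.length_filter_le
    (fun i => decide (PySem.List.slice D (some i) (some (i + 8)) = pvFlag))
    (PySem.List.pyRange 0 D.length 1)
  unfold pvPositions
  calc _ ≤ _ := h
    _ ≤ D.length := by rw [PySem.List.length_pyRange_one]; omega

-- entering the loop at 0 or at the first match position makes no difference
theorem pv_first_step (D : List Char) (c : List (List Char)) (f : Nat) (k : Nat)
    (h0 : PySem.Chars.findFrom D pvFlag 0 = (k : Int))
    (hk : PySem.Chars.findFrom D pvFlag (k : Int) = (k : Int)) :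
    pvALoop D c 0 (f + 1) = pvALoop D c (k : Int) (f + 1) := by
  simp only [pvALoop, h0, hk]

theorem pv_top (D : List Char) :
    pvALoop D [] 0 (D.length + 1) =
      (match pvPositions D with
       | [] => []
       | p :: ps => pvBFrames D p ps) := by
  rcases hP : pvPositions D with _ | ⟨p, ps⟩
  · -- no flag at all
    have hnone : PySem.Chars.findFrom D pvFlag 0 = -1 := by
      rw [pv_findFrom_eq_neg_one le_rfl]
      intro k _ hk
      have := pv_mem_positions.mpr hk
      rw [hP] at this
      cases this
    simp only [pvALoop, hnone]
    simp
  · -- first flag at p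
    obtain ⟨k0, rfl, hk0⟩ := pv_positions_shape (D := D) (x := p) (by rw [hP]; simp)
    have hsort := pv_positions_sorted D
    rw [hP] at hsort
    have hne : PySem.Chars.findFrom D pvFlag 0 ≠ -1 := by
      rw [Ne, pv_findFrom_eq_neg_one le_rfl]
      push Not
      exact ⟨k0, by omega, hk0⟩
    obtain ⟨_, h2, h3, h4⟩ := pv_findFrom_spec le_rfl hne
    set r := PySem.Chars.findFrom D pvFlag 0 with hr
    have hrP : r ∈ pvPositions D := by
      have : ((r.toNat : Nat) : Int) ∈ pvPositions D := pv_mem_positions.mpr h3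
      rwa [show ((r.toNat : Nat) : Int) = r by omega] at this
    have hle1 : (k0 : Int) ≤ r := by
      rw [hP] at hrP
      rcases List.mem_cons.mp hrP with heq | hm
      · omega
      · have := (List.pairwise_cons.mp hsort).1 r hm; omega
    have hle2 : r ≤ (k0 : Int) := by
      by_contra hlt
      exact h4 k0 (by omega) (by omega) hk0
    have hreq : PySem.Chars.findFrom D pvFlag 0 = (k0 : Int) := by omega
    rw [pv_first_step D [] D.length k0 hreq (pv_findFrom_at_match hk0)]
    rw [pv_main D (D.length + 1) ps k0 [] ?_ hk0 (List.pairwise_cons.mp hsort).2 ?_]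
    · simp
    · have h5 := pv_length_positions D
      rw [hP] at h5; simp at h5; omega
    · intro x
      constructor
      · intro hx
        obtain ⟨k, rfl, hk⟩ := pv_positions_shape (D := D) (x := x)
          (by rw [hP]; exact List.mem_cons_of_mem _ hx)
        exact ⟨(List.pairwise_cons.mp hsort).1 _ hx, k, rfl, hk⟩
      · rintro ⟨hlt, k, rfl, hk⟩
        have : (k : Int) ∈ pvPositions D := pv_mem_positions.mpr hk
        rw [hP] at this
        rcases List.mem_cons.mp this with heq | hm
        · omega
        · exact hm

-- ===== VERDICT (by name: the statement is the Claim_ definition above) =====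
theorem split_recieved_data_on_cadres_spec : Claim_equal_split_recieved_data_on_cadres := by
  intro data _
  unfold Spec_split_recieved_data_on_cadres
  unfold split_recieved_data_on_cadres split_recieved_data_on_cadres_alt
  rw [pv_top data.toList]
  cases pvPositions data.toList <;> simp
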